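-- pv_equiv track=rewrite | github.com/Davit00tar/Anaconda-SpecOps-Training | AUG5.py | del_third_symb
-- ===== SOURCE A (Python) =====
-- def del_third_symb(data):
--     count = 1
--     ans=""
--     for char in data:
--         if count  % 3 == 0:
--             pass
--         else:
--             ans += char
--         count += 1
--
--     return ans
-- ===== SOURCE B (Python) =====
-- def del_third_symb(data):
--     parts = []
--     for i in range(0, len(data), 3):
--         parts.append(data[i:i+2])
--     return "".join(parts)
-- ===== Notes on version B (the rewrite author's own statement) =====
-- stated objective: idiomatic
-- what changed: Replaced the per-character loop with a modulo-3 counter and repeated string concatenation by a stepped traversal over range(0, len(data), 3) that collects the two-character slice data[i:i+2] of each block and joins them once.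
import Mathlib
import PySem

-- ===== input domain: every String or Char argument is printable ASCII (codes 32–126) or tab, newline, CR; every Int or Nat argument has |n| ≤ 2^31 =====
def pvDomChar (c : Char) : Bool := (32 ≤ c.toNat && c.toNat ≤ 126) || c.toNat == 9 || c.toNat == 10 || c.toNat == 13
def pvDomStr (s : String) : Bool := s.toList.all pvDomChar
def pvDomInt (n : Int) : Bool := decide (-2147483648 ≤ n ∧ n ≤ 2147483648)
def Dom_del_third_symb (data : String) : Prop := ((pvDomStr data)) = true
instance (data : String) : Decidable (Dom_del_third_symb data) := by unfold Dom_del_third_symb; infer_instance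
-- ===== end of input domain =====

-- B replaces A's per-character modulo-3 counter by a stepped traversal over range(0, len, 3)
-- joining the two-character slice of each block (objective: idiomatic; same O(n) cost).

-- ===== PORT A =====
-- A: count from 1 over each char; skip the char when count % 3 == 0, append it otherwise.
def del_third_symb (data : String) : String :=
  let st := data.toList.foldl
    (fun (st : Int × List Char) char =>
      if PySem.Int.mod st.1 3 = 0 then (st.1 + 1, st.2)
      else (st.1 + 1, st.2 ++ [char]))
    (1, [])
  String.ofList st.2

-- ===== PORT B =====
-- B: parts = []; for i in range(0, len(data), 3): parts.append(data[i:i+2]); return "".join(parts)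
def del_third_symb_alt (data : String) : String :=
  let parts := (PySem.List.pyRange 0 (data.toList.length : Int) 3).foldl
    (fun (acc : List (List Char)) i =>
      acc ++ [PySem.List.slice data.toList (some i) (some (i + 2))])
    []
  String.ofList parts.flatten

-- ===== PRECONDITION & SPEC =====
def Spec_del_third_symb (data : String) (out : String) : Prop := out = del_third_symb_alt data
instance (data : String) (out : String) : Decidable (Spec_del_third_symb data out) := by unfold Spec_del_third_symb; infer_instance

-- ===== CLAIM (what is proved, stated in full; the proofs are below) =====
def Claim_equal_del_third_symb : Prop := ∀ (data : String), Dom_del_third_symb data → Spec_del_third_symb data (del_third_symb data)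

-- ===== LEMMAS AND PROOFS =====

-- Reference recursion both ports are reduced to: keep two chars of every 3-chunk, drop the third.
def pvDrop3 : List Char → List Char
  | [] => []
  | [a] => [a]
  | [a, b] => [a, b]
  | a :: b :: _ :: t => a :: b :: pvDrop3 t

theorem pvLoopA_eq (l : List Char) : ∀ (acc : List Char) (c : Int), PySem.Int.mod c 3 = 1 →
    (l.foldl (fun (st : Int × List Char) char =>
      if PySem.Int.mod st.1 3 = 0 then (st.1 + 1, st.2)
      else (st.1 + 1, st.2 ++ [char])) (c, acc)).2 = acc ++ pvDrop3 l := by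
  induction l using pvDrop3.induct with
  | case1 => intro acc c _; simp [pvDrop3]
  | case2 a =>
      intro acc c hc
      have h1 : ¬ PySem.Int.mod c 3 = 0 := by
        simp only [PySem.Int.mod, Int.fmod_eq_emod] at *; omega
      simp only [List.foldl]
      rw [if_neg h1]
      simp [pvDrop3]
  | case3 a b =>
      intro acc c hc
      have h1 : ¬ PySem.Int.mod c 3 = 0 := by
        simp only [PySem.Int.mod, Int.fmod_eq_emod] at *; omega
      have h2 : ¬ PySem.Int.mod (c + 1) 3 = 0 := by
        simp only [PySem.Int.mod, Int.fmod_eq_emod] at *; omega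
      simp only [List.foldl]
      rw [if_neg h1, if_neg h2]
      simp [pvDrop3]
  | case4 a b x t ih =>
      intro acc c hc
      have h1 : ¬ PySem.Int.mod c 3 = 0 := by
        simp only [PySem.Int.mod, Int.fmod_eq_emod] at *; omega
      have h2 : ¬ PySem.Int.mod (c + 1) 3 = 0 := by
        simp only [PySem.Int.mod, Int.fmod_eq_emod] at *; omega
      have h3 : PySem.Int.mod (c + 1 + 1) 3 = 0 := by
        simp only [PySem.Int.mod, Int.fmod_eq_emod] at *; omega
      have h4 : PySem.Int.mod (c + 1 + 1 + 1) 3 = 1 := by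
        simp only [PySem.Int.mod, Int.fmod_eq_emod] at *; omega
      simp only [List.foldl]
      rw [if_neg h1, if_neg h2, if_pos h3]
      rw [ih (acc ++ [a] ++ [b]) (c + 1 + 1 + 1) h4]
      simp [pvDrop3]

theorem pvFoldl_snoc_map {α β : Type} (f : α → β) (r : List α) :
    ∀ (init : List β), r.foldl (fun acc i => acc ++ [f i]) init = init ++ r.map f := by
  induction r with
  | nil => intro init; simp
  | cons x r ih => intro init; simp [List.foldl, ih]

theorem pvRange3_nil (b : Int) (h : b ≤ 0) : PySem.List.pyRange 0 b 3 = [] := by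
  rw [PySem.List.pyRange_of_pos 0 b (by norm_num)]
  have : ¬ (0:Int) < b := by omega
  simp [this]

theorem pvRange3_cons (b : Int) (h : 0 < b) :
    PySem.List.pyRange 0 b 3 = 0 :: (PySem.List.pyRange 0 (b - 3) 3).map (· + 3) := by
  rw [PySem.List.pyRange_of_pos 0 b (by norm_num),
      PySem.List.pyRange_of_pos 0 (b - 3) (by norm_num)]
  have hn : (if (0:Int) < b then ((b - 0 + 3 - 1)/3).toNat else 0)
      = (if (0:Int) < b - 3 then ((b - 3 - 0 + 3 - 1)/3).toNat else 0) + 1 := by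
    split_ifs <;> omega
  rw [hn, List.range_succ_eq_map]
  simp only [List.map_cons, List.map_map]
  refine congrArg₂ List.cons (by norm_num) ?_
  apply List.map_congr_left
  intro k _
  simp only [Function.comp, Nat.succ_eq_add_one]
  push_cast
  ring

theorem pvLoopB_eq (l : List Char) :
    ((PySem.List.pyRange 0 (l.length : Int) 3).map
      (fun i => PySem.List.slice l (some i) (some (i + 2)))).flatten = pvDrop3 l := by
  induction l using pvDrop3.induct with
  | case1 =>
      have h0 : ((List.length ([] : List Char)) : Int) = 0 := by simp
      rw [h0, pvRange3_nil 0 (by omega)]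
      simp [pvDrop3]
  | case2 a =>
      have h0 : ((List.length [a]) : Int) = 1 := by simp
      rw [h0, pvRange3_cons 1 (by omega), pvRange3_nil _ (by omega)]
      simp only [List.map_nil, List.map_cons, List.flatten]
      rw [PySem.List.slice_toNat _ (by omega) (by omega)]
      simp [pvDrop3]
  | case3 a b =>
      have h0 : ((List.length [a, b]) : Int) = 2 := by simp
      rw [h0, pvRange3_cons 2 (by omega), pvRange3_nil _ (by omega)]
      simp only [List.map_nil, List.map_cons, List.flatten]
      rw [PySem.List.slice_toNat _ (by omega) (by omega)]
      simp [pvDrop3]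
  | case4 a b x t ih =>
      have hlen : ((a :: b :: x :: t).length : Int) = (t.length : Int) + 3 := by
        simp; omega
      rw [hlen, pvRange3_cons _ (by omega)]
      have hsub : (t.length : Int) + 3 - 3 = (t.length : Int) := by ring
      rw [hsub]
      simp only [List.map_cons, List.map_map, List.flatten_cons]
      have hhead : PySem.List.slice (a :: b :: x :: t) (some 0) (some (0 + 2)) = [a, b] := by
        rw [PySem.List.slice_toNat _ (by omega) (by omega)]; rfl
      have htail : (PySem.List.pyRange 0 (t.length : Int) 3).map
            ((fun i => PySem.List.slice (a :: b :: x :: t) (some i) (some (i + 2))) ∘ (· + 3))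
          = (PySem.List.pyRange 0 (t.length : Int) 3).map
            (fun i => PySem.List.slice t (some i) (some (i + 2))) := by
        apply List.map_congr_left
        intro i hi
        have h0 : 0 ≤ i := ((PySem.List.mem_pyRange_iff_of_pos (by norm_num) i).1 hi).1
        simp only [Function.comp]
        rw [PySem.List.slice_toNat _ (by omega) (by omega),
            PySem.List.slice_toNat _ (by omega) (by omega)]
        have h1 : (i + 3).toNat = i.toNat + 3 := by omega
        have h2 : (i + 3 + 2).toNat - (i.toNat + 3) = 2 := by omega
        have h3 : (i + 2).toNat - i.toNat = 2 := by omega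
        have hd : List.drop (i.toNat + 3) (a :: b :: x :: t) = List.drop i.toNat t := rfl
        rw [h1, h2, h3, hd]
      rw [htail, hhead, ih]
      simp [pvDrop3]

-- ===== VERDICT (by name: the statement is the Claim_ definition above) =====
theorem del_third_symb_spec : Claim_equal_del_third_symb := by
  intro data _
  unfold Spec_del_third_symb
  simp only [del_third_symb, del_third_symb_alt]
  rw [pvLoopA_eq data.toList [] 1 (by decide),
      pvFoldl_snoc_map (fun i => PySem.List.slice data.toList (some i) (some (i + 2)))
        (PySem.List.pyRange 0 (data.toList.length : Int) 3) [],
      List.nil_append, List.nil_append, pvLoopB_eq]
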